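-- pv_equiv track=rewrite | github.com/ivanpayments/payment-routing-simulator | payment_router/pattern_rules/bins.py | bin_is_valid_for_brand
-- ===== SOURCE A (Python) =====
-- BRAND_BIN_PREFIXES: dict[str, tuple[str, ...]] = {
--     "visa": ("4",),
--     "mastercard": ("51", "52", "53", "54", "55", "22", "23", "24", "25", "26", "27"),
--     "amex": ("34", "37"),
--     "discover": ("6011", "644", "645", "646", "647", "648", "649", "65"),
--     # CC109 strict: JCB must be in the 3528–3589 range.
--     "jcb": tuple(str(p) for p in range(3528, 3590)),
--     "unionpay": ("62",),
-- }
--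
-- def bin_is_valid_for_brand(brand: str, bin6: str | None) -> bool:
--     """True if bin6 matches at least one acceptable prefix for the brand.
--
--     Unknown brands always return True (we cannot assert). Empty/missing bin
--     returns True (nothing to validate).
--     """
--     if not bin6:
--         return True
--     b = str(bin6)
--     prefixes = BRAND_BIN_PREFIXES.get(brand.lower())
--     if prefixes is None:
--         return True
--     return any(b.startswith(p) for p in prefixes)
-- ===== SOURCE B (Python) =====
-- BRAND_BIN_PREFIXES: dict[str, tuple[str, ...]] = {
--     "visa": ("4",),
--     "mastercard": ("51", "52", "53", "54", "55", "22", "23", "24", "25", "26", "27"),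
--     "amex": ("34", "37"),
--     "discover": ("6011", "644", "645", "646", "647", "648", "649", "65"),
--     "jcb": tuple(str(p) for p in range(3528, 3590)),
--     "unionpay": ("62",),
-- }
--
--
-- def _build_index() -> dict[str, dict[int, set[str]]]:
--     index = {}
--     for brand, prefixes in BRAND_BIN_PREFIXES.items():
--         by_len: dict[int, set[str]] = {}
--         for p in prefixes:
--             by_len.setdefault(len(p), set()).add(p)
--         index[brand] = by_len
--     return index
--
--
-- BRAND_BIN_PREFIX_INDEX = _build_index()
--
--
-- def bin_is_valid_for_brand(brand: str, bin6: str | None) -> bool: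
--     if not bin6:
--         return True
--     b = str(bin6)
--     by_len = BRAND_BIN_PREFIX_INDEX.get(brand.lower())
--     if by_len is None:
--         return True
--     return any(b[:k] in s for k, s in by_len.items())
-- ===== Notes on version B (the rewrite author's own statement) =====
-- stated objective: idiomatic
-- what changed: Replaces A's flat any-scan over every brand prefix with a precomputed per-brand index mapping each prefix length to the set of prefixes of that length, so lookup does one slice + set-membership per distinct prefix length instead of one startswith per prefix.
import Mathlib
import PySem

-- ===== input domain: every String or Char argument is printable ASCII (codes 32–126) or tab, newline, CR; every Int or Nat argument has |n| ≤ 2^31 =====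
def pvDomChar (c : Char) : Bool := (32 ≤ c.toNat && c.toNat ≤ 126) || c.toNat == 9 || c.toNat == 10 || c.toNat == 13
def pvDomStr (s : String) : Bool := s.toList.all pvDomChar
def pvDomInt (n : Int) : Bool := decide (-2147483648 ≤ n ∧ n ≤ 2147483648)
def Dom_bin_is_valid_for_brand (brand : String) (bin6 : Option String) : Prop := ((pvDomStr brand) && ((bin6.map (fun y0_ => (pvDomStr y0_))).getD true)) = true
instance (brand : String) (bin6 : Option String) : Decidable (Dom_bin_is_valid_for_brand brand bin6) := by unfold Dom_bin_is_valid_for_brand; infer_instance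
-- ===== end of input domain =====

-- B replaces A's flat scan over all prefixes by a precomputed per-brand index
-- (prefix length -> set of prefixes), checking one slice per distinct length (objective: idiomatic).

-- ===== PORT A =====
-- module constant BRAND_BIN_PREFIXES
def pvBrandBinPrefixes : PySem.Dict String (List String) := PySem.Dict.mk
  [ ("visa", ["4"]),
    ("mastercard", ["51","52","53","54","55","22","23","24","25","26","27"]),
    ("amex", ["34","37"]),
    ("discover", ["6011","644","645","646","647","648","649","65"]),
    ("jcb", (PySem.List.pyRange 3528 3590 1).map PySem.Int.toStr),
    ("unionpay", ["62"]) ]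

def bin_is_valid_for_brand (brand : String) (bin6 : Option String) : Bool :=
  match bin6 with
  | none => true                       -- `if not bin6` (None is falsy)
  | some s =>
    if s = "" then true                -- `if not bin6` ("" is falsy)
    else
      match pvBrandBinPrefixes.get? (PySem.Str.lower brand) with
      | none => true
      | some prefixes => prefixes.any (fun p => PySem.Str.startswith s p)

-- ===== PORT B =====
-- BRAND_BIN_PREFIX_INDEX = _build_index(): brand -> {len(p) -> {p, ...}}
def pvBrandBinPrefixIndex : PySem.Dict String (PySem.Dict Int (PySem.Set String)) :=
  pvBrandBinPrefixes.items.foldl (fun index bp =>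
    index.insert bp.1 (bp.2.foldl (fun byLen p =>
      -- by_len.setdefault(len(p), set()).add(p)  (in-place add on the default/stored set)
      byLen.modify (PySem.Str.len p : Int) PySem.Set.empty (fun st => PySem.Set.add st p)) PySem.Dict.empty)) PySem.Dict.empty

def bin_is_valid_for_brand_alt (brand : String) (bin6 : Option String) : Bool :=
  match bin6 with
  | none => true
  | some b =>
    if b = "" then true
    else
      match pvBrandBinPrefixIndex.get? (PySem.Str.lower brand) with
      | none => true
      | some byLen => byLen.items.any (fun kv => PySem.Set.contains kv.2 (PySem.Str.slice b none (some kv.1)))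

-- ===== PRECONDITION & SPEC =====
def Spec_bin_is_valid_for_brand (brand : String) (bin6 : Option String) (out : Bool) : Prop := out = bin_is_valid_for_brand_alt brand bin6
instance (brand : String) (bin6 : Option String) (out : Bool) : Decidable (Spec_bin_is_valid_for_brand brand bin6 out) := by unfold Spec_bin_is_valid_for_brand; infer_instance

-- ===== CLAIM (what is proved, stated in full; the proofs are below) =====
def Claim_equal_bin_is_valid_for_brand : Prop := ∀ (brand : String) (bin6 : Option String), Dom_bin_is_valid_for_brand brand bin6 → Spec_bin_is_valid_for_brand brand bin6 (bin_is_valid_for_brand brand bin6)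

-- ===== LEMMAS AND PROOFS =====

-- b.startswith(p)  =  b[:len(p)] == p
lemma pv_sw_eq_slice (s p : String) :
    PySem.Str.startswith s p = (PySem.Str.slice s none (some (p.toList.length : Int)) == p) := by
  rw [Bool.eq_iff_iff]
  have h1 : (PySem.Str.slice s none (some (p.toList.length : Int))).toList = s.toList.take p.toList.length := by
    simp [PySem.Str.slice, PySem.List.slice_to_natCast]
  have h2 : PySem.Str.startswith s p = true ↔ p.toList <+: s.toList := by
    rw [← PySem.Chars.startswith_iff]; simp
  rw [h2, List.prefix_iff_eq_take, beq_iff_eq, String.ext_iff, h1, eq_comm]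

-- a scan over same-length prefixes is one slice + membership
lemma pv_group (s : String) (k : Int) (ps : List String)
    (h : ∀ p ∈ ps, (p.toList.length : Int) = k) :
    ps.any (fun p => PySem.Str.startswith s p) = PySem.Set.contains ps (PySem.Str.slice s none (some k)) := by
  induction ps with
  | nil => rfl
  | cons p ps ih =>
    have hp := h p (List.mem_cons_self ..)
    rw [List.any_cons, ih (fun q hq => h q (List.mem_cons_of_mem _ hq)),
      pv_sw_eq_slice s p, hp]
    simp only [PySem.Set.contains, List.contains_cons]

-- ===== VERDICT (by name: the statement is the Claim_ definition above) =====
set_option maxRecDepth 16384 in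
theorem bin_is_valid_for_brand_spec : Claim_equal_bin_is_valid_for_brand := by
  unfold Claim_equal_bin_is_valid_for_brand
  intro brand bin6 _
  unfold Spec_bin_is_valid_for_brand bin_is_valid_for_brand bin_is_valid_for_brand_alt
  cases bin6 with
  | none => rfl
  | some s =>
    simp only
    split_ifs with hs
    · rfl
    by_cases hvisa : "visa" = PySem.Str.lower brand
    · rw [← hvisa]
      rw [show pvBrandBinPrefixes.get? "visa" = some ["4"] from rfl,
          show pvBrandBinPrefixIndex.get? "visa" = some (PySem.Dict.mk [((1:Int), ["4"])]) from rfl]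
      simp only
      rw [pv_group s 1 ["4"] (by decide)]
      simp
    by_cases hmastercard : "mastercard" = PySem.Str.lower brand
    · rw [← hmastercard]
      rw [show pvBrandBinPrefixes.get? "mastercard" = some ["51","52","53","54","55","22","23","24","25","26","27"] from rfl,
          show pvBrandBinPrefixIndex.get? "mastercard" = some (PySem.Dict.mk [((2:Int), ["51","52","53","54","55","22","23","24","25","26","27"])]) from rfl]
      simp only
      rw [pv_group s 2 ["51","52","53","54","55","22","23","24","25","26","27"] (by decide)]
      simp
    by_cases hamex : "amex" = PySem.Str.lower brand
    · rw [← hamex]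
      rw [show pvBrandBinPrefixes.get? "amex" = some ["34","37"] from rfl,
          show pvBrandBinPrefixIndex.get? "amex" = some (PySem.Dict.mk [((2:Int), ["34","37"])]) from rfl]
      simp only
      rw [pv_group s 2 ["34","37"] (by decide)]
      simp
    by_cases hdiscover : "discover" = PySem.Str.lower brand
    · rw [← hdiscover]
      rw [show pvBrandBinPrefixes.get? "discover" = some ["6011","644","645","646","647","648","649","65"] from rfl,
          show pvBrandBinPrefixIndex.get? "discover" = some (PySem.Dict.mk [((4:Int), ["6011"]), ((3:Int), ["644","645","646","647","648","649"]), ((2:Int), ["65"])]) from rfl]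
      simp only
      rw [show ["6011","644","645","646","647","648","649","65"] = ["6011"] ++ ["644","645","646","647","648","649"] ++ ["65"] from rfl, List.any_append, List.any_append]
      rw [pv_group s 4 ["6011"] (by decide), pv_group s 3 ["644","645","646","647","648","649"] (by decide), pv_group s 2 ["65"] (by decide)]
      simp [Bool.or_assoc]
    by_cases hjcb : "jcb" = PySem.Str.lower brand
    · rw [← hjcb]
      rw [show pvBrandBinPrefixes.get? "jcb" = some ((PySem.List.pyRange 3528 3590 1).map PySem.Int.toStr) from rfl,
          show pvBrandBinPrefixIndex.get? "jcb" = some (PySem.Dict.mk [((4:Int), ((PySem.List.pyRange 3528 3590 1).map PySem.Int.toStr))]) from rfl]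
      simp only
      rw [pv_group s 4 ((PySem.List.pyRange 3528 3590 1).map PySem.Int.toStr) (by decide)]
      simp
    by_cases hunionpay : "unionpay" = PySem.Str.lower brand
    · rw [← hunionpay]
      rw [show pvBrandBinPrefixes.get? "unionpay" = some ["62"] from rfl,
          show pvBrandBinPrefixIndex.get? "unionpay" = some (PySem.Dict.mk [((2:Int), ["62"])]) from rfl]
      simp only
      rw [pv_group s 2 ["62"] (by decide)]
      simp
    · have hA : pvBrandBinPrefixes.get? (PySem.Str.lower brand) = none := by
        simp only [pvBrandBinPrefixes, PySem.Dict.get?_mk_cons, beq_iff_eq, hvisa, hmastercard, hamex, hdiscover, hjcb, hunionpay, if_false]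
        rfl
      have hB : pvBrandBinPrefixIndex.get? (PySem.Str.lower brand) = none := by
        rw [show pvBrandBinPrefixIndex = PySem.Dict.mk
          [ ("visa", PySem.Dict.mk [((1:Int), ["4"])]),
            ("mastercard", PySem.Dict.mk [((2:Int), ["51","52","53","54","55","22","23","24","25","26","27"])]),
            ("amex", PySem.Dict.mk [((2:Int), ["34","37"])]),
            ("discover", PySem.Dict.mk [((4:Int), ["6011"]), ((3:Int), ["644","645","646","647","648","649"]), ((2:Int), ["65"])]),
            ("jcb", PySem.Dict.mk [((4:Int), ((PySem.List.pyRange 3528 3590 1).map PySem.Int.toStr))]),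
            ("unionpay", PySem.Dict.mk [((2:Int), ["62"])]) ] from rfl]
        simp only [PySem.Dict.get?_mk_cons, beq_iff_eq, hvisa, hmastercard, hamex, hdiscover, hjcb, hunionpay, if_false]
        rfl
      rw [hA, hB]
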